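-- pv_equiv track=rewrite | github.com/PearuUu/CKE_Zbor_Zadan_zadanie_praktyczne | 69.py | Z3
-- ===== SOURCE A (Python) =====
-- def znajdz_geny(genotyp):
--     geny = []
--     czy_gen = False
--     for i in range(len(genotyp)-1):
--         if genotyp[i] == "A" and genotyp[i+1] == "A" and czy_gen == False:
--             czy_gen = True
--             gen = ""
--         elif genotyp[i] == "B" and genotyp[i+1] == "B" and czy_gen == True:
--             czy_gen = False
--             gen += "BB"
--             geny.append(gen)
--         if czy_gen:
--             gen += genotyp[i]
--     return geny
--
-- def Z3(genotypy):
--     max_geny = 0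
--     max_gen = 0
--
--     for genotyp in genotypy:
--         geny = znajdz_geny(genotyp)
--         if len(geny) > max_geny:
--             max_geny = len(geny)
--
--         for gen in geny:
--             if len(gen) > max_gen:
--                 max_gen = len(gen)
--
--     return max_geny, max_gen
-- ===== SOURCE B (Python) =====
-- def Z3(genotypy):
--     max_geny = 0
--     max_gen = 0
--     for genotyp in genotypy:
--         count = 0
--         pos = 0
--         while True:
--             s = genotyp.find("AA", pos)
--             if s == -1:
--                 break
--             e = genotyp.find("BB", s + 2)
--             if e == -1:
--                 break
--             count += 1
--             if e + 2 - s > max_gen: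
--                 max_gen = e + 2 - s
--             pos = e + 2
--         if count > max_geny:
--             max_geny = count
--     return max_geny, max_gen
-- ===== Notes on version B (the rewrite author's own statement) =====
-- stated objective: alternative
-- what changed: Replaces the char-by-char boolean state machine (which inspects every adjacent pair and accumulates gene strings) by a jump scan that uses str.find to locate each 'AA' start and its closing 'BB' directly, tracking only the count and max length instead of building gene substrings.
import Mathlib
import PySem

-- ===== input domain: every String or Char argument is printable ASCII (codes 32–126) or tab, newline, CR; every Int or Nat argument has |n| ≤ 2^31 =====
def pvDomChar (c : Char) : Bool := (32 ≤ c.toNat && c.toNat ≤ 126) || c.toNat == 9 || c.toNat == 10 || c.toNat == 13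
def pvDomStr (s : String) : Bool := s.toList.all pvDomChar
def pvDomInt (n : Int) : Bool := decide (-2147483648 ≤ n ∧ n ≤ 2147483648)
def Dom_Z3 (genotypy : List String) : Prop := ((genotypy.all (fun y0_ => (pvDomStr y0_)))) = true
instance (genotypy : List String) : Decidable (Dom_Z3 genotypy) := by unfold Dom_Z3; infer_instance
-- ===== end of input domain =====

-- B replaces A's per-character boolean state machine by a str.find-based jump scan (return values only; neither version mutates its argument).

-- ===== PORT A =====
-- loop body of znajdz_geny, A's branches in order: c1, c2 are genotyp[i], genotyp[i+1];
-- state is (geny, czy_gen, gen)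
def stepA (st : List (List Char) × Bool × List Char) (c1 c2 : Char) :
    List (List Char) × Bool × List Char :=
  let st1 :=
    if c1 = 'A' ∧ c2 = 'A' ∧ st.2.1 = false then (st.1, true, ([] : List Char))
    else if c1 = 'B' ∧ c2 = 'B' ∧ st.2.1 = true then
      (st.1 ++ [st.2.2 ++ ['B', 'B']], false, st.2.2 ++ ['B', 'B'])
    else st
  if st1.2.1 then (st1.1, st1.2.1, st1.2.2 ++ [c1]) else st1

-- znajdz_geny: fold of the loop body over range(len(genotyp)-1)
def znajdzGeny (genotyp : String) : List (List Char) :=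
  ((PySem.List.pyRange 0 (PySem.Str.len genotyp - 1) 1).foldl
    (fun st i => stepA st (PySem.List.pyGetD genotyp.toList i ' ')
      (PySem.List.pyGetD genotyp.toList (i + 1) ' '))
    ([], false, [])).1

def Z3 (genotypy : List String) : Int × Int :=
  (genotypy.foldl
    (fun (acc : Int × Int) genotyp =>
      let geny := znajdzGeny genotyp
      let maxGeny := if PySem.List.len geny > acc.1 then PySem.List.len geny else acc.1
      let maxGen := geny.foldl (fun m gen => if PySem.List.len gen > m then PySem.List.len gen else m) acc.2
      (maxGeny, maxGen))
    (0, 0))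

-- ===== PORT B =====
-- termination facts for the jump scan (cited by decreasing_by):
theorem pvFindFrom_of_len_lt (cs sub : List Char) (pos : Nat) (h : cs.length < pos) :
    PySem.Chars.findFrom cs sub (pos : Int) none = -1 := by
  have h0 : ¬ ((pos : Int) < 0) := by omega
  have h1 : ((cs.length : Int) < (pos : Int)) := by exact_mod_cast h
  simp [PySem.Chars.findFrom, h0, h1]

theorem pvFindFrom_pos_le {cs sub : List Char} {pos : Nat}
    (hs : PySem.Chars.findFrom cs sub (pos : Int) none ≠ -1) : pos ≤ cs.length := by
  by_contra h
  exact hs (pvFindFrom_of_len_lt cs sub pos (by omega))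

theorem pvFindFrom_bounds {cs sub : List Char} {pos : Nat} (hlen : sub.length = 2)
    (hs : PySem.Chars.findFrom cs sub (pos : Int) none ≠ -1) :
    (pos : Int) ≤ PySem.Chars.findFrom cs sub (pos : Int) none ∧
      (PySem.Chars.findFrom cs sub (pos : Int) none).toNat + 2 ≤ cs.length := by
  have hple : pos ≤ cs.length := pvFindFrom_pos_le hs
  obtain ⟨h1, h2, -⟩ := PySem.Chars.findFrom_natCast_spec cs sub pos hple hs
  refine ⟨h1, ?_⟩
  have := h2.length_le
  simp [List.length_drop, hlen] at this
  omega

-- the jump scan: find the next "AA", then its closing "BB"; count the gene and record its length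
def Z3altLoop (cs : List Char) (pos : Nat) (count maxGen : Int) : Int × Int :=
  let s := PySem.Chars.findFrom cs ['A', 'A'] (pos : Int) none
  if hs : s = -1 then (count, maxGen)
  else
    let e := PySem.Chars.findFrom cs ['B', 'B'] (s + 2) none
    if he : e = -1 then (count, maxGen)
    else
      Z3altLoop cs (e.toNat + 2) (count + 1)
        (if e + 2 - s > maxGen then e + 2 - s else maxGen)
termination_by cs.length + 1 - pos
decreasing_by
  have hs' : PySem.Chars.findFrom cs ['A', 'A'] (pos : Int) none ≠ -1 := hs
  have hsb := pvFindFrom_bounds (cs := cs) (sub := ['A', 'A']) (pos := pos) rfl hs'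
  have hs0 : (0 : Int) ≤ PySem.Chars.findFrom cs ['A', 'A'] (pos : Int) none :=
    le_trans (by omega) hsb.1
  have hcast : PySem.Chars.findFrom cs ['A', 'A'] (pos : Int) none + 2 =
      (((PySem.Chars.findFrom cs ['A', 'A'] (pos : Int) none).toNat + 2 : Nat) : Int) := by omega
  have he' : PySem.Chars.findFrom cs ['B', 'B']
      ((((PySem.Chars.findFrom cs ['A', 'A'] (pos : Int) none).toNat + 2 : Nat)) : Int) none ≠ -1 := by
    rw [← hcast]; exact he
  have heb := pvFindFrom_bounds (cs := cs) (sub := ['B', 'B']) rfl he'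
  have hpos : pos ≤ cs.length := pvFindFrom_pos_le hs'
  rw [hcast]
  omega

def Z3_alt (genotypy : List String) : Int × Int :=
  (genotypy.foldl
    (fun (acc : Int × Int) genotyp =>
      let r := Z3altLoop genotyp.toList 0 0 acc.2
      (if r.1 > acc.1 then r.1 else acc.1, r.2))
    (0, 0))

-- ===== PRECONDITION & SPEC =====
def Spec_Z3 (genotypy : List String) (out : Int × Int) : Prop := out = Z3_alt genotypy
instance (genotypy : List String) (out : Int × Int) : Decidable (Spec_Z3 genotypy out) := by unfold Spec_Z3; infer_instance

-- ===== CLAIM (what is proved, stated in full; the proofs are below) =====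
def Claim_equal_Z3 : Prop := ∀ (genotypy : List String), Dom_Z3 genotypy → Spec_Z3 genotypy (Z3 genotypy)

-- ===== LEMMAS AND PROOFS =====

-- reference scanner: A's state machine written as mutual structural recursion on the character list
mutual
def seekG : List Char → List (List Char)
  | c1 :: c2 :: rest => if c1 = 'A' ∧ c2 = 'A' then growG ['A'] (c2 :: rest) else seekG (c2 :: rest)
  | _ => []
termination_by cs => cs.length
def growG (gen : List Char) : List Char → List (List Char)
  | c1 :: c2 :: rest =>
      if c1 = 'B' ∧ c2 = 'B' then (gen ++ ['B', 'B']) :: seekG (c2 :: rest)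
      else growG (gen ++ [c1]) (c2 :: rest)
  | _ => []
termination_by cs => cs.length
end

-- the index fold of A over range(n-1) is the fold of stepA over adjacent pairs
theorem foldl_range_stepA (cs : List Char) (b : List (List Char) × Bool × List Char) :
    (List.range (cs.length - 1)).foldl
        (fun st k => stepA st (cs.getD k ' ') (cs.getD (k + 1) ' ')) b
      = (cs.zip cs.tail).foldl (fun st p => stepA st p.1 p.2) b := by
  have hz : cs.zip cs.tail
      = (List.range (cs.length - 1)).map (fun k => (cs.getD k ' ', cs.getD (k + 1) ' ')) := by
    apply List.ext_getElem
    · simp [List.length_zip, List.length_tail]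
    · intro i h1 h2
      simp only [List.length_zip, List.length_tail] at h1
      have hi : i < cs.length := by omega
      have hi1 : i + 1 < cs.length := by omega
      simp [List.getElem_zip, List.getElem_tail, hi, hi1]
  rw [hz, List.foldl_map]

-- fold of stepA over the pairs computes seekG / growG
theorem pairFold_machine (cs : List Char) :
    (∀ geny gen, ((cs.zip cs.tail).foldl (fun st p => stepA st p.1 p.2) (geny, false, gen)).1
        = geny ++ seekG cs)
    ∧ (∀ geny gen, ((cs.zip cs.tail).foldl (fun st p => stepA st p.1 p.2) (geny, true, gen)).1
        = geny ++ growG gen cs) := by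
  induction cs with
  | nil => simp [seekG, growG]
  | cons c1 tl ih =>
    cases tl with
    | nil => simp [seekG, growG]
    | cons c2 rest =>
      obtain ⟨ihS, ihG⟩ := ih
      simp only [List.tail_cons] at ihS ihG
      constructor
      · intro geny gen
        by_cases h : c1 = 'A' ∧ c2 = 'A'
        · simp only [List.zip_cons_cons, List.tail_cons, List.foldl_cons]
          have hst : stepA (geny, false, gen) c1 c2 = (geny, true, [c1]) := by
            simp [stepA, h]
          rw [hst, ihG geny [c1], h.1]
          simp [seekG, h]
        · simp only [List.zip_cons_cons, List.tail_cons, List.foldl_cons]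
          have hst : stepA (geny, false, gen) c1 c2 = (geny, false, gen) := by
            simp [stepA, h]
          rw [hst, ihS geny gen]
          simp [seekG, h]
      · intro geny gen
        by_cases h : c1 = 'B' ∧ c2 = 'B'
        · simp only [List.zip_cons_cons, List.tail_cons, List.foldl_cons]
          have hst : stepA (geny, true, gen) c1 c2
              = (geny ++ [gen ++ ['B', 'B']], false, gen ++ ['B', 'B']) := by
            simp [stepA, h]
          rw [hst, ihS]
          simp [growG, h]
        · simp only [List.zip_cons_cons, List.tail_cons, List.foldl_cons]
          have hst : stepA (geny, true, gen) c1 c2 = (geny, true, gen ++ [c1]) := by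
            simp [stepA, h]
          rw [hst, ihG geny (gen ++ [c1])]
          simp [growG, h]

theorem znajdzGeny_eq_seekG (g : String) : znajdzGeny g = seekG g.toList := by
  unfold znajdzGeny
  rcases Nat.eq_zero_or_pos g.toList.length with h | h
  · have hnil : g.toList = [] := List.length_eq_zero_iff.mp h
    have h0 : PySem.Str.len g - 1 = -1 := by rw [PySem.Str.len_eq, hnil]; norm_num
    rw [h0, show PySem.List.pyRange 0 (-1) 1 = [] from by decide, hnil]
    simp [seekG]
  · have hc : PySem.Str.len g - 1 = ((g.toList.length - 1 : Nat) : Int) := by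
      rw [PySem.Str.len_eq]; omega
    rw [hc, PySem.List.pyRange_zero_natCast, List.foldl_map]
    have hcast : ∀ k : Nat, (k : Int) + 1 = ((k + 1 : Nat) : Int) := by
      intro k; push_cast; ring
    simp only [hcast, PySem.List.pyGetD_natCast]
    rw [foldl_range_stepA, (pairFold_machine g.toList).1]
    simp

-- "sub occurs in l" unpacked to prefixes of drops
theorem infix_drop_iff (sub l : List Char) : sub <:+: l ↔ ∃ j, sub <+: l.drop j := by
  rw [← PySem.Chars.isIn_iff_infix, ← PySem.Chars.exists_prefix_drop_iff_isIn]

theorem seekG_cons_ne {c : Char} {t : List Char} (h : c ≠ 'A') : seekG (c :: t) = seekG t := by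
  cases t with
  | nil => simp [seekG]
  | cons c2 r => simp [seekG, h]

theorem seekG_no {cs : List Char} (h : ¬ ['A', 'A'] <:+: cs) : seekG cs = [] := by
  induction cs with
  | nil => simp [seekG]
  | cons c t ih =>
    cases t with
    | nil => simp [seekG]
    | cons c2 r =>
      have h0 : ¬ (c = 'A' ∧ c2 = 'A') := by
        rintro ⟨rfl, rfl⟩
        exact h ⟨[], r, rfl⟩
      rw [show seekG (c :: c2 :: r) = seekG (c2 :: r) by simp [seekG, h0]]
      exact ih (fun hx => h (hx.trans (List.suffix_cons c (c2 :: r)).isInfix))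

theorem growG_no {cs : List Char} (h : ¬ ['B', 'B'] <:+: cs) : ∀ gen, growG gen cs = [] := by
  induction cs with
  | nil => intro gen; simp [growG]
  | cons c t ih =>
    intro gen
    cases t with
    | nil => simp [growG]
    | cons c2 r =>
      have h0 : ¬ (c = 'B' ∧ c2 = 'B') := by
        rintro ⟨rfl, rfl⟩
        exact h ⟨[], r, rfl⟩
      rw [show growG gen (c :: c2 :: r) = growG (gen ++ [c]) (c2 :: r) by simp [growG, h0]]
      exact ih (fun hx => h (hx.trans (List.suffix_cons c (c2 :: r)).isInfix)) _

theorem seekG_first : ∀ (j : Nat) (cs : List Char), ['A', 'A'] <+: cs.drop j →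
    (∀ i, i < j → ¬ ['A', 'A'] <+: cs.drop i) →
    seekG cs = growG ['A'] (cs.drop (j + 1)) := by
  intro j
  induction j with
  | zero =>
    intro cs hp _
    simp only [List.drop_zero] at hp
    obtain ⟨t, ht⟩ := hp
    subst ht
    simp [seekG]
  | succ j ih =>
    intro cs hp hmin
    cases cs with
    | nil => simp at hp
    | cons c t =>
      cases t with
      | nil => simp at hp
      | cons c2 r =>
        have h0 : ¬ (c = 'A' ∧ c2 = 'A') := by
          rintro ⟨rfl, rfl⟩
          exact hmin 0 (Nat.succ_pos j) ⟨r, rfl⟩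
        rw [show seekG (c :: c2 :: r) = seekG (c2 :: r) by simp [seekG, h0]]
        rw [List.drop_succ_cons] at hp
        rw [show (c :: c2 :: r).drop (j + 1 + 1) = (c2 :: r).drop (j + 1) from List.drop_succ_cons ..]
        exact ih (c2 :: r) hp (fun i hi => by
          have := hmin (i + 1) (by omega)
          rwa [List.drop_succ_cons] at this)

theorem growG_first : ∀ (j : Nat) (cs : List Char) (gen : List Char), ['B', 'B'] <+: cs.drop j →
    (∀ i, i < j → ¬ ['B', 'B'] <+: cs.drop i) →
    growG gen cs = (gen ++ cs.take j ++ ['B', 'B']) :: seekG (cs.drop (j + 1)) := by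
  intro j
  induction j with
  | zero =>
    intro cs gen hp _
    simp only [List.drop_zero] at hp
    obtain ⟨t, ht⟩ := hp
    subst ht
    simp [growG]
  | succ j ih =>
    intro cs gen hp hmin
    cases cs with
    | nil => simp at hp
    | cons c t =>
      cases t with
      | nil => simp at hp
      | cons c2 r =>
        have h0 : ¬ (c = 'B' ∧ c2 = 'B') := by
          rintro ⟨rfl, rfl⟩
          exact hmin 0 (Nat.succ_pos j) ⟨r, rfl⟩
        rw [show growG gen (c :: c2 :: r) = growG (gen ++ [c]) (c2 :: r) by simp [growG, h0]]
        rw [List.drop_succ_cons] at hp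
        rw [ih (c2 :: r) (gen ++ [c]) hp (fun i hi => by
          have := hmin (i + 1) (by omega)
          rwa [List.drop_succ_cons] at this)]
        simp [List.take_succ_cons]

-- the per-branch facts the main induction needs
theorem scanAA {cs : List Char} {pos : Nat}
    (hs : PySem.Chars.findFrom cs ['A', 'A'] (pos : Int) none ≠ -1) :
    ∃ (sn : Nat) (rest : List Char),
      PySem.Chars.findFrom cs ['A', 'A'] (pos : Int) none = (sn : Int) ∧ pos ≤ sn ∧
      cs.drop sn = 'A' :: 'A' :: rest ∧
      seekG (cs.drop pos) = growG ['A'] (cs.drop (sn + 1)) := by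
  have hple := pvFindFrom_pos_le hs
  obtain ⟨h1, hpre, hmin⟩ := PySem.Chars.findFrom_natCast_spec cs ['A', 'A'] pos hple hs
  have hS0 : (0 : Int) ≤ PySem.Chars.findFrom cs ['A', 'A'] (pos : Int) none :=
    le_trans (by omega) h1
  obtain ⟨t, ht⟩ := hpre
  refine ⟨(PySem.Chars.findFrom cs ['A', 'A'] (pos : Int) none).toNat, t, by omega, by omega, ht.symm, ?_⟩
  set sn := (PySem.Chars.findFrom cs ['A', 'A'] (pos : Int) none).toNat with hsn
  have hps : pos ≤ sn := by rw [hsn]; omega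
  have hd1 : (cs.drop pos).drop (sn - pos) = cs.drop sn := by
    rw [List.drop_drop]; congr 1; omega
  rw [seekG_first (sn - pos) (cs.drop pos) (by rw [hd1]; exact ⟨t, ht⟩)
    (fun i hi => by
      rw [List.drop_drop]
      exact hmin (pos + i) (by omega) (by omega))]
  rw [List.drop_drop, show pos + (sn - pos + 1) = sn + 1 from by omega]

theorem drop_parts {cs rest : List Char} {sn : Nat} (hd : cs.drop sn = 'A' :: 'A' :: rest) :
    sn + 2 ≤ cs.length ∧ cs.drop (sn + 1) = 'A' :: rest ∧ cs.drop (sn + 2) = rest := by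
  have hl := congrArg List.length hd
  simp [List.length_drop] at hl
  refine ⟨by omega, ?_, ?_⟩
  · rw [← List.tail_drop, hd]; rfl
  · rw [← List.tail_drop, ← List.tail_drop, hd]; rfl

theorem dropB_parts {cs rest : List Char} {en : Nat} (hd : cs.drop en = 'B' :: 'B' :: rest) :
    en + 2 ≤ cs.length ∧ cs.drop (en + 1) = 'B' :: rest ∧ cs.drop (en + 2) = rest := by
  have hl := congrArg List.length hd
  simp [List.length_drop] at hl
  refine ⟨by omega, ?_, ?_⟩
  · rw [← List.tail_drop, hd]; rfl
  · rw [← List.tail_drop, ← List.tail_drop, hd]; rfl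

theorem Z3altLoop_eq (cs : List Char) : ∀ (pos : Nat) (count maxGen : Int),
    Z3altLoop cs pos count maxGen =
      (count + ((seekG (cs.drop pos)).length : Int),
       (seekG (cs.drop pos)).foldl
         (fun m gen => if (gen.length : Int) > m then (gen.length : Int) else m) maxGen) := by
  refine Z3altLoop.induct cs _ ?caseS ?caseE ?caseRec
  case caseS =>
    intro pos count maxGen s hs
    have hsdef : s = PySem.Chars.findFrom cs ['A', 'A'] (pos : Int) none := rfl
    rw [hsdef] at hs
    have hseek : seekG (cs.drop pos) = [] := by
      by_cases hp : pos ≤ cs.length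
      · exact seekG_no ((PySem.Chars.findFrom_natCast_eq_neg_one_iff cs ['A', 'A'] pos hp).mp hs)
      · rw [List.drop_eq_nil_of_le (by omega)]; simp [seekG]
    rw [Z3altLoop]
    simp only [dif_pos hs]
    rw [hseek]
    simp
  case caseE =>
    intro pos count maxGen s hs e he
    have hsdef : s = PySem.Chars.findFrom cs ['A', 'A'] (pos : Int) none := rfl
    have hedef : e = PySem.Chars.findFrom cs ['B', 'B']
        (PySem.Chars.findFrom cs ['A', 'A'] (pos : Int) none + 2) none := by rw [← hsdef]
    rw [hsdef] at hs
    rw [hedef] at he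
    obtain ⟨sn, rest, hSval, hps, hdrop, hseek⟩ := scanAA hs
    obtain ⟨hlen2, hd1, hd2⟩ := drop_parts hdrop
    have hcast2 : ((sn : Int) + 2) = ((sn + 2 : Nat) : Int) := by push_cast; ring
    have he' : PySem.Chars.findFrom cs ['B', 'B'] ((sn + 2 : Nat) : Int) none = -1 := by
      rw [← hcast2, ← hSval]; exact he
    have hnoBB2 : ¬ ['B', 'B'] <:+: cs.drop (sn + 2) :=
      (PySem.Chars.findFrom_natCast_eq_neg_one_iff cs ['B', 'B'] (sn + 2) hlen2).mp he'
    have hnoBB1 : ¬ ['B', 'B'] <:+: cs.drop (sn + 1) := by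
      rw [hd1]; rw [hd2] at hnoBB2
      intro hx
      rcases (infix_drop_iff _ _).mp hx with ⟨j, hj⟩
      cases j with
      | zero =>
        simp only [List.drop_zero] at hj
        exact absurd (List.cons_prefix_cons.mp hj).1 (by decide)
      | succ j =>
        rw [List.drop_succ_cons] at hj
        exact hnoBB2 ((infix_drop_iff _ _).mpr ⟨j, hj⟩)
    rw [Z3altLoop]
    simp only [dif_neg hs, dif_pos he]
    rw [hseek, growG_no hnoBB1]
    simp
  case caseRec =>
    intro pos count maxGen s hs e he ih
    have hsdef : s = PySem.Chars.findFrom cs ['A', 'A'] (pos : Int) none := rfl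
    have hedef : e = PySem.Chars.findFrom cs ['B', 'B']
        (PySem.Chars.findFrom cs ['A', 'A'] (pos : Int) none + 2) none := by rw [← hsdef]
    rw [hsdef] at hs
    rw [hedef] at he
    rw [hsdef, hedef] at ih
    obtain ⟨sn, rest, hSval, hps, hdrop, hseek⟩ := scanAA hs
    obtain ⟨hlen2, hd1, hd2⟩ := drop_parts hdrop
    have hcast2 : ((sn : Int) + 2) = ((sn + 2 : Nat) : Int) := by push_cast; ring
    have he' : PySem.Chars.findFrom cs ['B', 'B'] ((sn + 2 : Nat) : Int) none ≠ -1 := by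
      rw [← hcast2, ← hSval]; exact he
    obtain ⟨hE1, hEpre, hEmin⟩ :=
      PySem.Chars.findFrom_natCast_spec cs ['B', 'B'] (sn + 2) hlen2 he'
    have hE0 : (0 : Int) ≤ PySem.Chars.findFrom cs ['B', 'B'] ((sn + 2 : Nat) : Int) none :=
      le_trans (by omega) hE1
    obtain ⟨t2, ht2⟩ := hEpre
    set en := (PySem.Chars.findFrom cs ['B', 'B'] ((sn + 2 : Nat) : Int) none).toNat with hen
    have hsen : sn + 2 ≤ en := by rw [hen]; omega
    have hdropE : cs.drop en = 'B' :: 'B' :: t2 := ht2.symm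
    obtain ⟨hlenE, hdE1, hdE2⟩ := dropB_parts hdropE
    have hgrow : growG ['A'] (cs.drop (sn + 1)) =
        (['A'] ++ (cs.drop (sn + 1)).take (en - (sn + 1)) ++ ['B', 'B']) ::
          seekG ((cs.drop (sn + 1)).drop (en - (sn + 1) + 1)) := by
      apply growG_first
      · rw [List.drop_drop, show (sn + 1) + (en - (sn + 1)) = en by omega]
        exact ⟨t2, ht2⟩
      · intro i hi
        rw [List.drop_drop]
        cases i with
        | zero =>
          rw [show (sn + 1) + 0 = sn + 1 by omega, hd1]
          intro hx
          exact absurd (List.cons_prefix_cons.mp hx).1 (by decide)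
        | succ i =>
          apply hEmin (sn + 1 + (i + 1)) (by omega) (by omega)
    have hdrops : (cs.drop (sn + 1)).drop (en - (sn + 1) + 1) = cs.drop (en + 1) := by
      rw [List.drop_drop]; congr 1; omega
    have hseek2 : seekG (cs.drop (en + 1)) = seekG (cs.drop (en + 2)) := by
      rw [hdE1, hdE2]; exact seekG_cons_ne (by decide)
    have htklen : ((cs.drop (sn + 1)).take (en - (sn + 1))).length = en - (sn + 1) := by
      rw [List.length_take]
      simp [List.length_drop]
      omega
    rw [Z3altLoop]
    simp only [dif_neg hs, dif_neg he]
    simp only [dite_eq_ite] at ih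
    rw [hSval, hcast2, ← hen] at ih ⊢
    rw [ih]
    rw [hseek, hgrow, hdrops, hseek2]
    have hE : PySem.Chars.findFrom cs ['B', 'B'] ((sn + 2 : Nat) : Int) none = (en : Int) := by
      rw [hen]; omega
    have hglen : ((['A'] ++ (cs.drop (sn + 1)).take (en - (sn + 1)) ++ ['B', 'B']).length : Int)
        = (en : Int) + 2 - (sn : Int) := by
      rw [show (['A'] ++ (cs.drop (sn + 1)).take (en - (sn + 1)) ++ ['B', 'B']).length
          = 1 + (en - (sn + 1)) + 2 from by simp [htklen]; omega]
      omega
    simp only [List.foldl_cons, List.length_cons, Prod.mk.injEq]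
    refine ⟨by push_cast; ring, ?_⟩
    congr 1
    rw [hE, hglen]

-- ===== VERDICT (by name: the statement is the Claim_ definition above) =====
theorem Z3_spec : Claim_equal_Z3 := by
  intro genotypy _
  unfold Spec_Z3 Z3 Z3_alt
  congr 1
  funext acc g
  rw [znajdzGeny_eq_seekG, Z3altLoop_eq]
  simp [PySem.List.len_eq]
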